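-- pv_equiv track=rewrite | github.com/AngJianHwee/LeetCode | Leetcode/1807. Evaluate the Bracket Pairs of a String.py | evaluate
-- ===== SOURCE A (Python) =====
-- from typing import List
--
-- def evaluate(s: str, knowledge: List[List[str]]) -> str:
--     knowledge_dic = {}
--     for x,y in knowledge:
--         knowledge_dic[x] = y
--     new_s = ''
--     i = 0
--     while i <len(s):
--         if s[i] != "(":
--             new_s += s[i]
--             i+=1
--         else:
--             j = i+1
--             while s[j]!=")":
--                 j+=1
--             try:
--                 new_s += knowledge_dic[s[i+1:j]]
--             except:
--                 new_s += '?'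
--             i = j+1
--     return new_s
-- ===== SOURCE B (Python) =====
-- from typing import List
--
-- def evaluate(s: str, knowledge: List[List[str]]) -> str:
--     kd = {x: y for x, y in knowledge}
--     *body, tail = s.split(')')
--     pieces = []
--     for chunk in body:
--         lit, sep, key = chunk.partition('(')
--         pieces.append(lit + (kd.get(key, '?') if sep else ')'))
--     pieces.append(tail)
--     return ''.join(pieces)
-- ===== Notes on version B (the rewrite author's own statement) =====
-- stated objective: idiomatic
-- what changed: Replaces A's index-jumping while-loop scan (with an inner index scan for each closing bracket) by splitting the string on ')' once and mapping each chunk through partition('(') + dict.get, joining the pieces at the end; A raises on unmatched '(' and on non-pair knowledge rows, which Pre_ excludes.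
import Mathlib
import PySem

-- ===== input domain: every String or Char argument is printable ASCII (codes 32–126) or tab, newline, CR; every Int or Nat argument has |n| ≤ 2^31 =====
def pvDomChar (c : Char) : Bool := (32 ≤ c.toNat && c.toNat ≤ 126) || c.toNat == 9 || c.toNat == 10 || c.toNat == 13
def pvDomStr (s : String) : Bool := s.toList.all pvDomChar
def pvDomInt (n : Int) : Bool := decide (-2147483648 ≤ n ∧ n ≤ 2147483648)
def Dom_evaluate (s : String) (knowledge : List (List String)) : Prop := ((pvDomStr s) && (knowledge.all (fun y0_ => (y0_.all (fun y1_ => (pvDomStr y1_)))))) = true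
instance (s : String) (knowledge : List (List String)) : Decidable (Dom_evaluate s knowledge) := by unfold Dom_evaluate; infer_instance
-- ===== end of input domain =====

-- Port A is the original index-jumping scan; B replaces it by split-on-')' + partition-at-'(' + dict
-- lookup, joined at the end (idiomatic rewrite). Equivalence is claimed on Pre_: A raises elsewhere.


-- ===== PORT A =====
-- 'for x,y in knowledge: knowledge_dic[x] = y'; rows of length ≠ 2 raise ValueError (excluded by Pre_).
def evalADic (knowledge : List (List String)) : PySem.Dict String String :=
  knowledge.foldl (fun d r => match r with
    | [x, y] => d.insert x y
    | _ => d) PySem.Dict.empty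

-- A's while-loop over index i, transliterated as recursion on the remaining suffix s[i:] with the
-- accumulator new_s; the inner 'while s[j] != ")": j += 1' is the takeWhile/dropWhile scan of the
-- suffix (when no ')' follows, Python raises IndexError — excluded by Pre_); the try/except lookup
-- is get?/getD "?", and 'i = j+1' is dropping the found ')'.
def evalAGo (dic : PySem.Dict String String) : List Char → List Char → List Char
  | acc, [] => acc
  | acc, c :: rest =>
    if c ≠ '(' then evalAGo dic (acc ++ [c]) rest
    else
      let key := rest.takeWhile (· ≠ ')')
      let rest' := rest.dropWhile (· ≠ ')')
      evalAGo dic (acc ++ ((dic.get? (String.ofList key)).getD "?").toList) (rest'.drop 1)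
  termination_by _ cs => cs.length
  decreasing_by
    · simp
    · have h1 := List.length_dropWhile_le (fun c => decide (c ≠ ')')) rest
      simp_all
      omega

def evaluate (s : String) (knowledge : List (List String)) : String :=
  String.ofList (evalAGo (evalADic knowledge) [] s.toList)

-- ===== PORT B =====
def evalBDic (knowledge : List (List String)) : PySem.Dict String String :=
  knowledge.foldl (fun d r => match r with
    | [x, y] => d.insert x y
    | _ => d) PySem.Dict.empty

-- chunk.partition('(') ported by hand as takeWhile/dropWhile at the first '(' (exact: lit is the part
-- before the first '(', key the part after it; the [] branch is partition's empty separator result).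
def evalBChunk (dic : PySem.Dict String String) (chunk : List Char) : List Char :=
  let lit := chunk.takeWhile (· ≠ '(')
  match chunk.dropWhile (· ≠ '(') with
  | [] => lit ++ [')']
  | _ :: key => lit ++ ((dic.get? (String.ofList key)).getD "?").toList

-- s.split(')') is ported as List.splitOn ')' (Python-exact for a one-character separator: keeps
-- empty chunks); '*body, tail' is dropLast/getLastD; ''.join is flatten.
def evaluate_alt (s : String) (knowledge : List (List String)) : String :=
  let dic := evalBDic knowledge
  let chunks := s.toList.splitOn ')'
  String.ofList ((chunks.dropLast.map (evalBChunk dic)).flatten ++ chunks.getLastD [])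

-- ===== PRECONDITION & SPEC =====
-- Pre_ excludes exactly the inputs on which A raises: a knowledge row that is not a pair
-- (ValueError on unpacking) and a '(' occurring after the last ')' of s (the inner scan for the
-- matching ')' runs off the end: IndexError).
def Pre_evaluate (s : String) (knowledge : List (List String)) : Prop :=
  (∀ r ∈ knowledge, r.length = 2) ∧ '(' ∉ s.toList.reverse.takeWhile (· ≠ ')')
instance (s : String) (knowledge : List (List String)) : Decidable (Pre_evaluate s knowledge) := by unfold Pre_evaluate; infer_instance

def pvWitness_evaluate : String × List (List String) := ("(a)b((x)", [["a", "yes"], ["b", "no"]])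

def Spec_evaluate (s : String) (knowledge : List (List String)) (out : String) : Prop := out = evaluate_alt s knowledge
instance (s : String) (knowledge : List (List String)) (out : String) : Decidable (Spec_evaluate s knowledge out) := by unfold Spec_evaluate; infer_instance

-- ===== CLAIM (what is proved, stated in full; the proofs are below) =====
def Claim_equal_evaluate : Prop := ∀ (s : String) (knowledge : List (List String)), Dom_evaluate s knowledge → Pre_evaluate s knowledge → Spec_evaluate s knowledge (evaluate s knowledge)

-- ===== LEMMAS AND PROOFS =====

def PreC (cs : List Char) : Prop := '(' ∉ cs.reverse.takeWhile (· ≠ ')')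

lemma preC_append_rpar (a b : List Char) : PreC (a ++ ')' :: b) ↔ PreC b := by
  unfold PreC
  rw [show (a ++ ')' :: b).reverse = b.reverse ++ ')' :: a.reverse by simp,
    List.takeWhile_append]
  split_ifs with hall
  · have hb : List.takeWhile (fun x => decide (x ≠ ')')) b.reverse = b.reverse :=
      (List.takeWhile_prefix _).eq_of_length hall
    rw [hb, List.takeWhile_cons]
    simp
  · exact Iff.rfl

lemma preC_no_rpar (cs : List Char) (h : ')' ∉ cs) : PreC cs ↔ '(' ∉ cs := by
  unfold PreC
  rw [List.takeWhile_eq_self_iff.mpr (by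
    intro x hx
    simp only [decide_eq_true_eq]
    rintro rfl
    exact h (by simpa using hx))]
  simp

lemma split_at_first_rpar (rest : List Char) (h : ')' ∈ rest) :
    rest = rest.takeWhile (· ≠ ')') ++ ')' :: (rest.dropWhile (· ≠ ')')).drop 1 ∧
      ')' ∉ rest.takeWhile (· ≠ ')') := by
  have hne : rest.dropWhile (· ≠ ')') ≠ [] := by
    intro hnil
    rw [List.dropWhile_eq_nil_iff] at hnil
    have := hnil _ h
    simp at this
  have hhead : ((rest.dropWhile (· ≠ ')')).head hne) = ')' := by
    have := List.head_dropWhile_not (p := fun x => decide (x ≠ ')')) hne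
    simpa using this
  constructor
  · nth_rewrite 1 [← List.takeWhile_append_dropWhile (p := (· ≠ ')')) (l := rest)]
    congr 1
    rw [← List.cons_head_tail hne, hhead]
    simp [List.drop_one]
  · intro hx
    have := List.mem_takeWhile_imp hx
    simp at this

lemma preC_cons (c : Char) (rest : List Char) (h : PreC (c :: rest)) (hc : c ≠ '(') : PreC rest := by
  by_cases hr : ')' ∈ rest
  · obtain ⟨hsplit, hnr⟩ := split_at_first_rpar rest hr
    have h1 : PreC (c :: rest) ↔ PreC ((rest.dropWhile (· ≠ ')')).drop 1) := by
      nth_rewrite 1 [hsplit]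
      exact preC_append_rpar (c :: rest.takeWhile (· ≠ ')')) _
    have h2 : PreC rest ↔ PreC ((rest.dropWhile (· ≠ ')')).drop 1) := by
      nth_rewrite 1 [hsplit]
      exact preC_append_rpar _ _
    exact h2.mpr (h1.mp h)
  · by_cases hcr : c = ')'
    · subst hcr
      exact (preC_append_rpar [] rest).mp h
    · have := (preC_no_rpar (c :: rest) (by simp [hr, Ne.symm hcr])).mp h
      rw [preC_no_rpar rest hr]
      intro hx; exact this (List.mem_cons_of_mem _ hx)

lemma preC_lpar (rest : List Char) (h : PreC ('(' :: rest)) : ')' ∈ rest := by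
  by_contra hr
  have := (preC_no_rpar ('(' :: rest) (by simp [hr])).mp h
  exact this (List.mem_cons_self)

def evalBComb (dic : PySem.Dict String String) : List (List Char) → List Char
  | [] => []
  | [h] => h
  | h :: t => evalBChunk dic h ++ evalBComb dic t

lemma evalBComb_eq (dic : PySem.Dict String String) (chunks : List (List Char)) :
    (chunks.dropLast.map (evalBChunk dic)).flatten ++ chunks.getLastD [] = evalBComb dic chunks := by
  induction chunks with
  | nil => simp [evalBComb]
  | cons h t ih =>
    cases t with
    | nil => simp [evalBComb]
    | cons h2 t2 =>
      simp only [evalBComb, List.dropLast_cons₂, List.map_cons, List.flatten_cons,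
        List.getLastD_cons]
      rw [← ih]
      simp only [List.append_assoc, List.getLastD_cons]

lemma splitOn_cons_ne (c : Char) (rest : List Char) (hc : c ≠ ')') :
    (c :: rest).splitOn ')' = (rest.splitOn ')').modifyHead (c :: ·) := by
  simp [List.splitOn, List.splitOnP_cons, hc]

lemma splitOn_rpar_append (a b : List Char) (ha : ')' ∉ a) :
    (a ++ ')' :: b).splitOn ')' = a :: b.splitOn ')' := by
  induction a with
  | nil => simp [List.splitOn, List.splitOnP_cons]
  | cons c a2 ih =>
    have hc : c ≠ ')' := by rintro rfl; exact ha List.mem_cons_self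
    rw [List.cons_append, splitOn_cons_ne c _ hc, ih (fun hx => ha (List.mem_cons_of_mem _ hx))]
    rfl

lemma evalBChunk_cons (dic : PySem.Dict String String) (c : Char) (h : List Char) (hc : c ≠ '(') :
    evalBChunk dic (c :: h) = c :: evalBChunk dic h := by
  unfold evalBChunk
  rw [List.takeWhile_cons, List.dropWhile_cons]
  simp only [hc, decide_not]
  rcases hdd : List.dropWhile (fun x => !decide (x = '(')) h with _ | ⟨x, key⟩ <;> simp

lemma evalBComb_modifyHead (dic : PySem.Dict String String) (c : Char) (chunks : List (List Char))
    (hne : chunks ≠ []) (hc : c ≠ '(') :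
    evalBComb dic (chunks.modifyHead (c :: ·)) = c :: evalBComb dic chunks := by
  cases chunks with
  | nil => exact absurd rfl hne
  | cons h t =>
    cases t with
    | nil => simp [evalBComb, List.modifyHead]
    | cons h2 t2 =>
      simp only [List.modifyHead, evalBComb, evalBChunk_cons dic c h hc, List.cons_append]


lemma splitOn_ne_nil (l : List Char) : l.splitOn ')' ≠ [] := by
  simp [List.splitOn]
  exact List.splitOnP_ne_nil _ _

lemma evalBComb_cons_ne (dic : PySem.Dict String String) (x : List Char) (l : List (List Char))
    (h : l ≠ []) : evalBComb dic (x :: l) = evalBChunk dic x ++ evalBComb dic l := by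
  cases l with
  | nil => exact absurd rfl h
  | cons a b => rfl

lemma evalBChunk_lpar (dic : PySem.Dict String String) (key : List Char) :
    evalBChunk dic ('(' :: key) = ((dic.get? (String.ofList key)).getD "?").toList := by
  unfold evalBChunk
  simp

lemma evalBChunk_nil (dic : PySem.Dict String String) : evalBChunk dic [] = [')'] := rfl

lemma evalAGo_eq (dic : PySem.Dict String String) :
    ∀ (n : Nat) (cs : List Char), cs.length ≤ n → PreC cs → ∀ acc,
      evalAGo dic acc cs = acc ++ evalBComb dic (cs.splitOn ')') := by
  intro n
  induction n with
  | zero =>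
    intro cs hlen _ acc
    have hnil : cs = [] := List.eq_nil_of_length_eq_zero (Nat.le_zero.mp hlen)
    subst hnil
    simp [evalAGo, List.splitOn, List.splitOnP_nil, evalBComb]
  | succ n ih =>
    intro cs hlen hpre acc
    cases cs with
    | nil => simp [evalAGo, List.splitOn, List.splitOnP_nil, evalBComb]
    | cons c rest =>
      have hrl : rest.length ≤ n := by simpa using hlen
      by_cases hcl : c = '('
      · subst hcl
        have hr : ')' ∈ rest := preC_lpar rest hpre
        obtain ⟨hsplit, hnr⟩ := split_at_first_rpar rest hr
        set tw := rest.takeWhile (· ≠ ')') with htw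
        set rest2 := (rest.dropWhile (· ≠ ')')).drop 1 with hrest2
        have hlen2 : rest2.length ≤ n := by
          have := congrArg List.length hsplit
          simp at this
          omega
        have hpre2 : PreC rest2 := by
          rw [show ('(' :: rest) = ('(' :: tw) ++ ')' :: rest2 from by rw [List.cons_append, ← hsplit]] at hpre
          exact (preC_append_rpar _ _).mp hpre
        have hstep : evalAGo dic acc ('(' :: rest) =
            evalAGo dic (acc ++ ((dic.get? (String.ofList tw)).getD "?").toList) rest2 := by
          rw [evalAGo, if_neg (by simp)]
        rw [hstep, ih rest2 hlen2 hpre2]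
        have hso : ('(' :: rest).splitOn ')' = ('(' :: tw) :: rest2.splitOn ')' := by
          rw [show ('(' :: rest) = ('(' :: tw) ++ ')' :: rest2 from by rw [List.cons_append, ← hsplit]]
          exact splitOn_rpar_append _ _ (by simp [hnr])
        rw [hso, evalBComb_cons_ne dic _ _ (splitOn_ne_nil _), evalBChunk_lpar]
        simp [List.append_assoc]
      · have hpre2 : PreC rest := preC_cons c rest hpre hcl
        have hstep : evalAGo dic acc (c :: rest) = evalAGo dic (acc ++ [c]) rest := by
          rw [evalAGo]
          simp [hcl]
        rw [hstep, ih rest hrl hpre2]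
        by_cases hcr : c = ')'
        · subst hcr
          have hso : (')' :: rest).splitOn ')' = [] :: rest.splitOn ')' :=
            splitOn_rpar_append [] rest (by simp)
          rw [hso, evalBComb_cons_ne dic _ _ (splitOn_ne_nil _), evalBChunk_nil]
          simp
        · rw [splitOn_cons_ne c rest hcr,
            evalBComb_modifyHead dic c _ (splitOn_ne_nil _) hcl]
          simp

-- ===== VERDICT (by name: the statement is the Claim_ definition above) =====
theorem evaluate_spec : Claim_equal_evaluate := by
  intro s knowledge _ hpre
  unfold Spec_evaluate evaluate evaluate_alt
  rw [evalAGo_eq (evalADic knowledge) s.toList.length s.toList le_rfl hpre.2 [],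
    ← evalBComb_eq]
  rfl
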